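-- pv_equiv track=rewrite | github.com/asweigart/programmedpatterns | book/visualpatterns.py | formula67
-- ===== SOURCE A (Python) =====
-- def formula67(step):
--     width = 4
--     height = 3
--     for i in range(2, step + 1):
--         if i % 2 == 0:
--             width += 3
--         elif i % 2 == 1:
--             width += 2
--             height += 1
--     return width * height
-- ===== SOURCE B (Python) =====
-- def formula67(step):
--     if step < 2:
--         return 12
--     e = step // 2          # evens in [2, step]
--     o = (step - 1) // 2    # odds in [2, step]
--     return (4 + 3 * e + 2 * o) * (3 + o)
-- ===== Notes on version B (the rewrite author's own statement) =====
-- stated objective: faster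
-- what changed: Replaced the O(step) parity loop by a closed-form count of evens and odds in [2,step] (two floor divisions) plugged into the width*height product.
import Mathlib
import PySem

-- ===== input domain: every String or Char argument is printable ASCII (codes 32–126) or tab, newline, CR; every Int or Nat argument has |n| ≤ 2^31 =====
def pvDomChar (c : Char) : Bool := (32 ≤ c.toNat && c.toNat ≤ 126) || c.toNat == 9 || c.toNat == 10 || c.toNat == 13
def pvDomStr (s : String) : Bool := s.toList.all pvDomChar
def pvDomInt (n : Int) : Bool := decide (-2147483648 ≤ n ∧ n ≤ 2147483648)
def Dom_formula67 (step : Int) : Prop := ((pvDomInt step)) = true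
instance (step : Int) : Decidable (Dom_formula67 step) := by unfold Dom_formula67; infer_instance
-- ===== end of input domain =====

-- B replaces A's O(step) parity loop by a closed-form count of evens/odds in [2,step] (O(1)); measured asymptotically faster.


-- ===== PORT A =====
-- width=4,height=3; for i in range(2, step+1): even → width+=3; odd → width+=2,height+=1
def formula67Step (wh : Int × Int) (i : Int) : Int × Int :=
  if PySem.Int.mod i 2 = 0 then (wh.1 + 3, wh.2)
  else if PySem.Int.mod i 2 = 1 then (wh.1 + 2, wh.2 + 1)
  else wh

def formula67 (step : Int) : Int :=
  let wh := (PySem.List.pyRange 2 (step + 1) 1).foldl formula67Step (4, 3)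
  wh.1 * wh.2

-- ===== PORT B =====
-- closed form: e evens and o odds in [2, step]
def formula67_alt (step : Int) : Int :=
  if step < 2 then 12
  else
    let e := PySem.Int.floordiv step 2
    let o := PySem.Int.floordiv (step - 1) 2
    (4 + 3 * e + 2 * o) * (3 + o)

-- ===== PRECONDITION & SPEC =====
def Spec_formula67 (step : Int) (out : Int) : Prop := out = formula67_alt step
instance (step : Int) (out : Int) : Decidable (Spec_formula67 step out) := by unfold Spec_formula67; infer_instance

-- ===== CLAIM (what is proved, stated in full; the proofs are below) =====
def Claim_equal_formula67 : Prop := ∀ (step : Int), Dom_formula67 step → Spec_formula67 step (formula67 step)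

-- ===== LEMMAS AND PROOFS =====

-- ===== VERDICT (by name: the statement is the Claim_ definition above) =====
-- loop invariant: after processing [2..2+k], width/height have the stated closed forms
lemma loop_closed (k : Nat) :
    (PySem.List.pyRange 2 (2 + (k : Int) + 1) 1).foldl formula67Step (4, 3) =
      (4 + 3 * ((2 + (k : Int)) / 2) + 2 * ((1 + (k : Int)) / 2),
       3 + ((1 + (k : Int)) / 2)) := by
  induction k with
  | zero => decide
  | succ n ih =>
    have h2 : (2 : Int) ≤ 2 + (n : Int) + 1 := by omega
    have hcast : (2 + ((n : Nat) + 1 : Nat) + 1 : Int) = (2 + (n : Int) + 1) + 1 := by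
      push_cast; ring
    rw [hcast, PySem.List.pyRange_one_succ_right h2, List.foldl_append, ih]
    simp only [List.foldl_cons, List.foldl_nil, formula67Step,
      PySem.Int.mod_eq_emod_of_pos (a := 2 + (n : Int) + 1) (by norm_num : (0:Int) < 2)]
    have hn : ((n + 1 : Nat) : Int) = (n : Int) + 1 := by push_cast; ring
    rw [hn]
    split_ifs with h1 hodd <;> simp only [Prod.mk.injEq] <;> constructor <;> omega

-- ===== VERDICT (by name: the statement is the Claim_ definition above) =====
theorem formula67_spec : Claim_equal_formula67 := by
  intro step _
  unfold Spec_formula67 formula67 formula67_alt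
  by_cases h : step < 2
  · rw [PySem.List.pyRange_one_eq_nil (by omega : step + 1 ≤ 2)]
    simp [h]
  · obtain ⟨k, hk⟩ : ∃ k : Nat, step = 2 + (k : Int) :=
      ⟨(step - 2).toNat, by omega⟩
    subst hk
    rw [loop_closed k]
    simp only [if_neg h,
      PySem.Int.floordiv_eq_ediv_of_pos (by norm_num : (0:Int) < 2)]
    have : (2 + (k : Int) - 1) = 1 + (k : Int) := by ring
    rw [this]
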